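-- pv_equiv track=rewrite | github.com/russross/marmot | sat/save.py | sortable_score
-- ===== SOURCE A (Python) =====
-- from typing import Optional, Set, Tuple, Dict
--
-- def sortable_score(problems: Set[Tuple[int, str]]) -> str:
--     """
--     Generate a sortable string representation of the score.
--
--     Format: <<99×00,98×00,...>> where first number is inverted priority level
--     and second is the count of violations at that level.
--     Lower values sort first, so better scores come earlier.
--
--     Args:
--         problems: Set of (priority, description) tuples
--
--     Returns:
--         String representation for sorting scores
--     """
--     # Count problems by priority level
--     counts_by_priority: Dict[int, int] = {}
--     for priority, _ in problems:
--         counts_by_priority[priority] = counts_by_priority.get(priority, 0) + 1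
--
--     if not counts_by_priority:
--         return "<<00:00>>"
--
--     parts = []
--     for priority, count in sorted(counts_by_priority.items()):
--         parts.append(f"{99-priority:02}×{count:02}")
--
--     return "<<" + ",".join(parts) + ">>"
-- ===== SOURCE B (Python) =====
-- def sortable_score(problems):
--     """Sort the priorities, then run-length encode consecutive equal runs in one pass (no tally dict)."""
--     if not problems:
--         return "<<00:00>>"
--     parts = []
--     prev = None
--     run = 0
--     for p in sorted(pr for pr, _ in problems):
--         if p == prev:
--             run += 1
--         else:
--             if prev is not None:
--                 parts.append(f"{99-prev:02}\u00d7{run:02}")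
--             prev, run = p, 1
--     parts.append(f"{99-prev:02}\u00d7{run:02}")
--     return "<<" + ",".join(parts) + ">>"
-- ===== Notes on version B (the rewrite author's own statement) =====
-- stated objective: alternative
-- what changed: Replaces the hash-tally dict plus sort-of-items with sort-then-scan: sort the priority list once and run-length encode consecutive equal runs in a single pass with (prev, run) accumulators, emitting each part when the run ends.
import Mathlib
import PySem

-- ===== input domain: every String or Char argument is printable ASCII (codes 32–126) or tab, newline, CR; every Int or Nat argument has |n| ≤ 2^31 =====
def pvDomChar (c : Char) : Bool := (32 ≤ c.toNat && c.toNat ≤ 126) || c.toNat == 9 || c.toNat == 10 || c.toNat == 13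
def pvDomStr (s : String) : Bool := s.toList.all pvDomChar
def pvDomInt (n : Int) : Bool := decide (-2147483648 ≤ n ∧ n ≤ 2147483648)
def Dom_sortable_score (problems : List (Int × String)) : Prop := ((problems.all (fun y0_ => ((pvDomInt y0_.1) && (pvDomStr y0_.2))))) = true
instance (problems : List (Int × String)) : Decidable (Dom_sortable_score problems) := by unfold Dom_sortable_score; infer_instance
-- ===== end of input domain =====

-- B replaces A's tally dict + sort of its items with sort-then-scan: sort the priorities once and
-- run-length encode consecutive equal runs in a single pass (alternative algorithm; same results).

-- ===== PORT A =====
-- f"{v:02}" is zero-pad to width 2 (sign in front), exactly PySem.Str.zfill (PySem.Int.toStr v) 2.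
def pvFmtA (pc : Int × Int) : String :=
  PySem.Str.zfill (PySem.Int.toStr (99 - pc.1)) 2 ++ "×" ++ PySem.Str.zfill (PySem.Int.toStr pc.2) 2

def sortable_score (problems : List (Int × String)) : String :=
  -- counts_by_priority tally loop
  let counts : PySem.Dict Int Int :=
    problems.foldl (fun d pr => d.insert pr.1 (d.getD pr.1 0 + 1)) PySem.Dict.empty
  if counts.size = 0 then "<<00:00>>"
  else
    -- sorted(counts.items()) sorts (priority, count) tuples lexicographically: sorted2 with keys fst, snd
    let parts : List String :=
      (PySem.List.sorted2 counts.items (·.1) (·.2)).foldl (fun acc pc => acc ++ [pvFmtA pc]) []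
    "<<" ++ PySem.Str.join "," parts ++ ">>"

-- ===== PORT B =====
def pvFmtB (p run : Int) : String :=
  PySem.Str.zfill (PySem.Int.toStr (99 - p)) 2 ++ "×" ++ PySem.Str.zfill (PySem.Int.toStr run) 2

-- one loop iteration of Source B: state = (prev, run, parts)
def pvStepB (st : Option Int × Int × List String) (p : Int) : Option Int × Int × List String :=
  if st.1 = some p then (st.1, st.2.1 + 1, st.2.2)
  else (some p, 1, st.2.2 ++ (match st.1 with | none => [] | some q => [pvFmtB q st.2.1]))

def sortable_score_alt (problems : List (Int × String)) : String :=
  if problems = [] then "<<00:00>>"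
  else
    let s := PySem.List.sorted (problems.map (·.1)) (fun x => x)
    let st := s.foldl pvStepB (none, 0, [])
    let parts := st.2.2 ++ (match st.1 with | none => [] | some q => [pvFmtB q st.2.1])
    "<<" ++ PySem.Str.join "," parts ++ ">>"

-- ===== PRECONDITION & SPEC =====
def Spec_sortable_score (problems : List (Int × String)) (out : String) : Prop := out = sortable_score_alt problems
instance (problems : List (Int × String)) (out : String) : Decidable (Spec_sortable_score problems out) := by unfold Spec_sortable_score; infer_instance

-- ===== CLAIM (what is proved, stated in full; the proofs are below) =====
def Claim_equal_sortable_score : Prop := ∀ (problems : List (Int × String)), Dom_sortable_score problems → Spec_sortable_score problems (sortable_score problems)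

-- ===== LEMMAS AND PROOFS =====

-- A-side reduction: the tally dict sorted by (priority, count) is the sorted distinct priorities
-- paired with their counts.

lemma pv_insertBy_lex_eq {α : Type} (k1 k2 : α → Int) (x : α) :
    ∀ acc : List α, (∀ y ∈ acc, k1 y ≠ k1 x) →
    PySem.List.insertBy
      (fun a b => decide (k1 a < k1 b) || (!decide (k1 b < k1 a) && decide (k2 a < k2 b))) x acc
    = PySem.List.insertBy (fun a b => decide (k1 a < k1 b)) x acc := by
  intro acc
  induction acc with
  | nil => intro _; rfl
  | cons y ys ih =>
    intro h
    have hne : k1 y ≠ k1 x := h y (by simp)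
    have hcond : (decide (k1 x < k1 y) || (!decide (k1 y < k1 x) && decide (k2 x < k2 y)))
        = decide (k1 x < k1 y) := by
      rcases lt_trichotomy (k1 x) (k1 y) with hlt | heq | hgt
      · simp [hlt, not_lt_of_gt hlt]
      · exact absurd heq.symm hne
      · simp [hgt, not_lt_of_gt hgt]
    simp only [PySem.List.insertBy, hcond]
    by_cases hc : k1 x < k1 y
    · simp [hc]
    · simp [hc, ih (fun y hy => h y (by simp [hy]))]

lemma pv_insertBy_perm {α : Type} (before : α → α → Bool) (x : α) :
    ∀ ys : List α, (PySem.List.insertBy before x ys).Perm (x :: ys) := by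
  intro ys
  induction ys with
  | nil => simp [PySem.List.insertBy]
  | cons y ys ih =>
    simp only [PySem.List.insertBy]
    split
    · exact List.Perm.refl _
    · exact (List.Perm.cons y ih).trans (List.Perm.swap x y ys)

lemma pv_foldl_insertBy_lex_eq {α : Type} (k1 k2 : α → Int) :
    ∀ (xs acc : List α), ((acc ++ xs).map k1).Nodup →
    xs.foldl (fun acc x => PySem.List.insertBy
      (fun a b => decide (k1 a < k1 b) || (!decide (k1 b < k1 a) && decide (k2 a < k2 b))) x acc) acc
    = xs.foldl (fun acc x => PySem.List.insertBy (fun a b => decide (k1 a < k1 b)) x acc) acc := by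
  intro xs
  induction xs with
  | nil => intro acc _; rfl
  | cons x xs ih =>
    intro acc hnd
    have hnd' := List.nodup_append.mp (by simpa using hnd :
      ((acc.map k1) ++ ((x :: xs).map k1)).Nodup)
    have hxacc : ∀ y ∈ acc, k1 y ≠ k1 x := by
      intro y hy hEq
      exact hnd'.2.2 (k1 y) (List.mem_map_of_mem hy) (k1 x) (by simp) hEq
    have hperm : ((PySem.List.insertBy (fun a b => decide (k1 a < k1 b)) x acc ++ xs).map k1).Perm
        (((acc ++ (x :: xs)).map k1)) :=
      List.Perm.map k1 ((List.Perm.append_right xs (pv_insertBy_perm _ x acc)).trans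
        List.perm_middle.symm)
    simp only [List.foldl_cons]
    rw [pv_insertBy_lex_eq k1 k2 x acc hxacc]
    exact ih _ (hperm.nodup_iff.mpr hnd)

-- sorted2 over a list with pairwise-distinct first keys is the sort by the first key alone.
lemma pv_sorted2_eq_sorted {α : Type} (xs : List α) (k1 k2 : α → Int) (h : (xs.map k1).Nodup) :
    PySem.List.sorted2 xs k1 k2 = PySem.List.sorted xs k1 := by
  rw [PySem.List.sorted_eq_foldl_insertBy]
  simp only [PySem.List.sorted2]
  exact pv_foldl_insertBy_lex_eq k1 k2 xs [] (by simpa using h)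

lemma pv_counter_sorted2 (ks : List Int) :
    PySem.List.sorted2 (PySem.Dict.counter ks).items (·.1) (·.2)
    = (PySem.List.sorted (PySem.Set.ofList ks) (fun x => x)).map
        (fun k => (k, (ks.count k : Int))) := by
  rw [PySem.Dict.items_counter]
  have hnd : ((List.map (fun k => (k, (List.count k ks : Int))) (PySem.Set.ofList ks)).map (·.1)).Nodup := by
    rw [List.map_map]
    have hid : ((fun x : Int × Int => x.1) ∘ fun k : Int => (k, (List.count k ks : Int))) = fun k => k := rfl
    rw [hid]
    simp
  rw [pv_sorted2_eq_sorted _ _ _ hnd]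
  apply PySem.List.sorted_eq_of_perm_of_pairwise_lt
  · exact List.Perm.map _ (PySem.List.sorted_perm _ _ _)
  · exact List.Pairwise.map _ (fun {a b} h => h) (PySem.List.sorted_ofList_pairwise_lt ks)

lemma pv_counts_eq (problems : List (Int × String)) :
    problems.foldl (fun d pr => d.insert pr.1 (d.getD pr.1 0 + 1)) PySem.Dict.empty
    = PySem.Dict.counter (problems.map (·.1)) := by
  rw [← PySem.Dict.foldl_insert_getD_add_one_eq_counter, List.foldl_map]

lemma pv_size_counter_ne (problems : List (Int × String)) (h : problems ≠ []) :
    (PySem.Dict.counter (problems.map (·.1))).size ≠ 0 := by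
  have : (PySem.Dict.counter (problems.map (·.1))).keys = PySem.Set.ofList (problems.map (·.1)) :=
    PySem.Dict.keys_counter _
  have hk : (PySem.Dict.counter (problems.map (·.1))).size
      = (PySem.Set.ofList (problems.map (·.1))).length := by
    simpa [PySem.Dict.size, PySem.Dict.keys] using congrArg List.length this
  rw [hk]
  cases problems with
  | nil => exact absurd rfl h
  | cons a l =>
    simp only [List.map_cons]
    have : a.1 ∈ PySem.Set.ofList (a.1 :: l.map (·.1)) := by
      rw [PySem.Set.mem_ofList]; simp
    intro hlen
    rw [List.length_eq_zero_iff.mp hlen] at this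
    simp at this

-- B-side reduction: the run-length scan over a sorted list produces exactly one part per distinct
-- priority, with the run length = its count.

-- absorbing a block of equal elements only bumps the run counter
lemma pv_fold_replicate (k : Int) : ∀ (m : Nat) (r : Int) (parts : List String),
    (List.replicate m k).foldl pvStepB (some k, r, parts) = (some k, r + m, parts) := by
  intro m
  induction m with
  | zero => intro r parts; simp
  | succ m ih =>
    intro r parts
    rw [List.replicate_succ, List.foldl_cons,
      show pvStepB (some k, r, parts) k = (some k, r + 1, parts) from by simp [pvStepB], ih]
    norm_num
    ring

-- the finishing append of Source B applied to a state
def pvFinishB (st : Option Int × Int × List String) : List String :=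
  st.2.2 ++ (match st.1 with | none => [] | some q => [pvFmtB q st.2.1])

-- scanning a strictly-increasing sequence of blocks emits one part per block
lemma pv_fold_blocks (c : Int → Nat) :
    ∀ d : List Int, d.Pairwise (· < ·) → (∀ q ∈ d, 0 < c q) →
    ∀ (k r : Int) (parts : List String), (∀ q ∈ d, k < q) →
    pvFinishB ((d.flatMap (fun q => List.replicate (c q) q)).foldl pvStepB (some k, r, parts))
    = parts ++ pvFmtB k r :: d.map (fun q => pvFmtB q (c q)) := by
  intro d
  induction d with
  | nil => intro _ _ k r parts _; simp [pvFinishB]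
  | cons q d ih =>
    intro hp hpos k r parts hlt
    have hkq : k < q := hlt q (by simp)
    have hcq : 0 < c q := hpos q (by simp)
    simp only [List.flatMap_cons, List.foldl_append]
    obtain ⟨m, hm⟩ : ∃ m, c q = m + 1 := ⟨c q - 1, by omega⟩
    rw [hm, List.replicate_succ, List.foldl_cons]
    have hne : (some k : Option Int) ≠ some q := by
      intro h; exact absurd (Option.some.inj h) (ne_of_lt hkq)
    simp only [pvStepB, if_neg hne]
    rw [pv_fold_replicate]
    have hp' := (List.pairwise_cons.mp hp).2
    have hq' : ∀ x ∈ d, q < x := (List.pairwise_cons.mp hp).1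
    rw [ih hp' (fun x hx => hpos x (by simp [hx])) q (1 + m) (parts ++ [pvFmtB k r]) hq']
    have : (1 : Int) + m = (c q : Int) := by omega
    simp [this]

-- count of an element in a flatMap of replicates over a nodup list
lemma pv_count_flatMap (c : Int → Nat) :
    ∀ (d : List Int), d.Nodup → ∀ a : Int,
    (d.flatMap (fun q => List.replicate (c q) q)).count a = if a ∈ d then c a else 0 := by
  intro d
  induction d with
  | nil => intro _ a; simp
  | cons q d ih =>
    intro hnd a
    have hnd' := (List.nodup_cons.mp hnd)
    simp only [List.flatMap_cons, List.count_append, List.count_replicate, ih hnd'.2 a]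
    by_cases haq : a = q
    · subst haq
      simp [hnd'.1]
    · simp [haq, Ne.symm haq]

-- the flatMap of replicates over the strictly sorted distinct priorities is sorted
lemma pv_flat_pairwise (c : Int → Nat) :
    ∀ (d : List Int), d.Pairwise (· < ·) →
    (d.flatMap (fun q => List.replicate (c q) q)).Pairwise (· ≤ ·) := by
  intro d
  induction d with
  | nil => intro _; simp
  | cons q d ih =>
    intro hp
    have hp' := List.pairwise_cons.mp hp
    simp only [List.flatMap_cons]
    rw [List.pairwise_append]
    refine ⟨List.pairwise_replicate.mpr (Or.inr le_rfl), ih hp'.2, ?_⟩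
    intro x hx y hy
    have hxq : x = q := List.eq_of_mem_replicate hx
    obtain ⟨z, hz, hyz⟩ := List.mem_flatMap.mp hy
    have hyz' : y = z := List.eq_of_mem_replicate hyz
    rw [hxq, hyz']
    exact le_of_lt (hp'.1 z hz)

-- canonical form of the sorted priority list: blocks of equal priorities in increasing order
lemma pv_sorted_eq_flat (ks : List Int) :
    PySem.List.sorted ks (fun x => x)
    = (PySem.List.sorted (PySem.Set.ofList ks) (fun x => x)).flatMap
        (fun q => List.replicate (ks.count q) q) := by
  set d := PySem.List.sorted (PySem.Set.ofList ks) (fun x => x) with hd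
  have hdlt : d.Pairwise (· < ·) := PySem.List.sorted_ofList_pairwise_lt ks
  have hdnd : d.Nodup := hdlt.imp ne_of_lt
  have hmemd : ∀ a : Int, a ∈ d ↔ a ∈ ks := by
    intro a
    rw [hd, PySem.List.mem_sorted, PySem.Set.mem_ofList]
  apply PySem.List.sorted_id_eq_of_perm_of_pairwise
  · rw [List.perm_iff_count]
    intro a
    rw [pv_count_flatMap _ d hdnd a]
    by_cases ha : a ∈ d
    · simp [ha]
    · simp [ha, List.count_eq_zero_of_not_mem ((hmemd a).not.mp ha)]
  · exact pv_flat_pairwise _ d hdlt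

-- the B-side parts list equals one part per sorted distinct priority with its count
lemma pv_alt_parts (ks : List Int) (h : ks ≠ []) :
    pvFinishB ((PySem.List.sorted ks (fun x => x)).foldl pvStepB (none, 0, []))
    = (PySem.List.sorted (PySem.Set.ofList ks) (fun x => x)).map
        (fun q => pvFmtB q (ks.count q)) := by
  rw [pv_sorted_eq_flat ks]
  set d := PySem.List.sorted (PySem.Set.ofList ks) (fun x => x) with hd
  have hdlt : d.Pairwise (· < ·) := PySem.List.sorted_ofList_pairwise_lt ks
  cases hde : d with
  | nil =>
    exfalso
    have : (PySem.Set.ofList ks) = [] := by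
      exact (PySem.List.sorted_eq_nil_iff _ _ _).mp (hd ▸ hde)
    cases ks with
    | nil => exact h rfl
    | cons a l =>
      have : a ∈ PySem.Set.ofList (a :: l) := by rw [PySem.Set.mem_ofList]; simp
      rw [‹PySem.Set.ofList (a :: l) = []›] at this
      simp at this
  | cons q d' =>
    have hcq : 0 < ks.count q := by
      have hq : q ∈ d := by rw [hde]; simp
      have : q ∈ ks := by
        rw [hd, PySem.List.mem_sorted, PySem.Set.mem_ofList] at hq; exact hq
      exact List.count_pos_iff.mpr this
    have hp' := List.pairwise_cons.mp (hde ▸ hdlt)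
    simp only [List.flatMap_cons]
    obtain ⟨m, hm⟩ : ∃ m, ks.count q = m + 1 := ⟨ks.count q - 1, by omega⟩
    rw [hm, List.replicate_succ, List.foldl_append, List.foldl_cons]
    have h1 : pvStepB (none, 0, []) q = (some q, 1, []) := by simp [pvStepB]
    rw [h1, pv_fold_replicate]
    rw [pv_fold_blocks (fun q => ks.count q) d' hp'.2
      (fun x hx => List.count_pos_iff.mpr (by
        have : x ∈ d := by rw [hde]; simp [hx]
        rw [hd, PySem.List.mem_sorted, PySem.Set.mem_ofList] at this; exact this))
      q (1 + m) [] hp'.1]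
    have : (1 : Int) + m = ((ks.count q : Nat) : Int) := by omega
    simp [this]

-- ===== VERDICT (by name: the statement is the Claim_ definition above) =====
theorem sortable_score_spec : Claim_equal_sortable_score := by
  intro problems _
  unfold Spec_sortable_score sortable_score sortable_score_alt
  by_cases hnil : problems = []
  · subst hnil; rfl
  · simp only [hnil, if_false, pv_counts_eq, pv_size_counter_ne problems hnil, if_false]
    rw [pv_counter_sorted2, PySem.List.foldl_append_singleton_eq_map, List.map_map]
    have hks : problems.map (·.1) ≠ [] := by
      intro h; exact hnil (List.map_eq_nil_iff.mp h)
    have := pv_alt_parts (problems.map (·.1)) hks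
    unfold pvFinishB at this
    rw [this]
    rfl
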